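-- pv_equiv track=rewrite | github.com/AaminaBokhari2/eduapp | pipeline.py | _is_life_sciences_topic
-- ===== SOURCE A (Python) =====
-- from typing import Dict, List, Tuple
-- from typing import Dict, List, Tuple
-- from typing import Dict, List
-- from typing import Dict, List
--
-- def _is_life_sciences_topic(topic: str, keywords: List[str]) -> bool:
--     """Check if topic is related to life sciences"""
--     life_science_terms = {
--         'biology', 'medical', 'medicine', 'health', 'clinical', 'biochemistry',
--         'genetics', 'molecular', 'cell', 'protein', 'gene', 'dna', 'rna',
--         'pharmaceutical', 'drug', 'therapy', 'treatment', 'disease', 'cancer',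
--         'neuroscience', 'psychology', 'physiology', 'anatomy', 'pathology',
--         'microbiology', 'immunology', 'pharmacology', 'epidemiology'
--     }
--
--     topic_lower = topic.lower()
--     keywords_lower = [k.lower() for k in keywords]
--
--     return any(term in topic_lower for term in life_science_terms) or \
--            any(any(term in keyword for term in life_science_terms) for keyword in keywords_lower)
-- ===== SOURCE B (Python) =====
-- _LIFE_TERMS = tuple(
--     (
--         'biology medical medicine health clinical biochemistry genetics '
--         'molecular cell protein gene dna rna pharmaceutical drug therapy '
--         'treatment disease cancer neuroscience psychology physiology '
--         'anatomy pathology microbiology immunology pharmacology epidemiology'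
--     ).split()
-- )
--
--
-- def _is_life_sciences_topic(topic, keywords):
--     """Check if topic is related to life sciences"""
--     # One lowercased space-joined haystack (no term contains whitespace, so the
--     # separator blocks cross-boundary matches), then scan it position by
--     # position, testing whether some term starts at the current offset
--     # (startswith with a tuple = any of the terms starts there).
--     blob = ' '.join([topic] + keywords).lower()
--     for i in range(len(blob)):
--         if blob.startswith(_LIFE_TERMS, i):
--             return True
--     return False
-- ===== Notes on version B (the rewrite author's own statement) =====
-- stated objective: alternative
-- what changed: B joins topic and keywords into one lowercased space-separated haystack and runs a single position-by-position scan testing whether any term starts at the current offset (terms kept as one split string), replacing A's per-string substring-membership tests (an any over the topic plus a nested any-over-keywords of 'term in keyword').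
import Mathlib
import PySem

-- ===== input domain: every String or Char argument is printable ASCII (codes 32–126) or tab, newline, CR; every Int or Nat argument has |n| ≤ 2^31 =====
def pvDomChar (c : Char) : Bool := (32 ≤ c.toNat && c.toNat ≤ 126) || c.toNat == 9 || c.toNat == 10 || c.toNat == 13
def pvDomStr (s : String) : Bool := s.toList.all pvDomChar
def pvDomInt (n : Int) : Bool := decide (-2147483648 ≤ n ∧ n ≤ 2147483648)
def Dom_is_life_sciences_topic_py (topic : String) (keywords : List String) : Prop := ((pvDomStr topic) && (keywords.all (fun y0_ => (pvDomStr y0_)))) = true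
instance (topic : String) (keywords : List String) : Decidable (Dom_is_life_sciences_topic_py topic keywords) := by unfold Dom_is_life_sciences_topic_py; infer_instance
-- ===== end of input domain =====

-- B builds one lowercased space-joined haystack and scans it position by position,
-- testing whether some term starts at each offset; A tests substring membership per
-- string. Objective: alternative (same cost, different traversal).

-- ===== PORT A =====
-- the Python set literal of terms (all distinct, insertion order)
def lifeScienceTermsA : PySem.Set String := PySem.Set.ofList
  ["biology", "medical", "medicine", "health", "clinical", "biochemistry",
   "genetics", "molecular", "cell", "protein", "gene", "dna", "rna",
   "pharmaceutical", "drug", "therapy", "treatment", "disease", "cancer",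
   "neuroscience", "psychology", "physiology", "anatomy", "pathology",
   "microbiology", "immunology", "pharmacology", "epidemiology"]

def is_life_sciences_topic_py (topic : String) (keywords : List String) : Bool :=
  let topic_lower := PySem.Str.lower topic
  let keywords_lower := keywords.map (fun k => PySem.Str.lower k)
  (lifeScienceTermsA.any (fun term => PySem.Str.isIn term topic_lower)) ||
    (keywords_lower.any (fun keyword => lifeScienceTermsA.any (fun term => PySem.Str.isIn term keyword)))

-- ===== PORT B =====
-- Source B keeps the terms as one whitespace-split string
def lifeTermsAlt : List String := PySem.Str.split₀
  "biology medical medicine health clinical biochemistry genetics molecular cell protein gene dna rna pharmaceutical drug therapy treatment disease cancer neuroscience psychology physiology anatomy pathology microbiology immunology pharmacology epidemiology"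

-- Source B's 'for i in range(len(blob)): if any(blob.startswith(term, i) …)': the i-th
-- iteration looks only at the suffix blob[i:], ported as structural recursion over
-- that suffix (one character consumed per step = i advancing by one).
def altScan : List Char → Bool
  | [] => false
  | c :: rest =>
      (lifeTermsAlt.any (fun term => PySem.Chars.startswith (c :: rest) term.toList)) || altScan rest

def is_life_sciences_topic_py_alt (topic : String) (keywords : List String) : Bool :=
  let blob := PySem.Str.lower (PySem.Str.join " " (topic :: keywords))
  altScan blob.toList

-- ===== PRECONDITION & SPEC =====
def Spec_is_life_sciences_topic_py (topic : String) (keywords : List String) (out : Bool) : Prop := out = is_life_sciences_topic_py_alt topic keywords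
instance (topic : String) (keywords : List String) (out : Bool) : Decidable (Spec_is_life_sciences_topic_py topic keywords out) := by unfold Spec_is_life_sciences_topic_py; infer_instance

-- ===== CLAIM (what is proved, stated in full; the proofs are below) =====
def Claim_equal_is_life_sciences_topic_py : Prop := ∀ (topic : String) (keywords : List String), Dom_is_life_sciences_topic_py topic keywords → Spec_is_life_sciences_topic_py topic keywords (is_life_sciences_topic_py topic keywords)

-- ===== LEMMAS AND PROOFS =====

-- a space-free pattern is an infix of `a ++ ' ' :: b` iff it is an infix of `a` or of `b`
theorem infix_append_space_cons (t a b : List Char) (hs : ' ' ∉ t) :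
    t <:+: a ++ ' ' :: b ↔ t <:+: a ∨ t <:+: b := by
  constructor
  · rintro ⟨s, u, hsu⟩
    by_cases h1 : s.length + t.length ≤ a.length
    · left
      have hd : (a ++ ' ' :: b).drop s.length = t ++ u := by
        rw [← hsu]; simp
      rw [List.drop_append_of_le_length (by omega)] at hd
      have ht : t = (a.drop s.length).take t.length := by
        have := congrArg (List.take t.length) hd
        rw [List.take_append_of_le_length (by simp; omega)] at this
        simpa using this.symm
      rw [ht]
      exact (List.take_prefix _ _).isInfix.trans (List.drop_suffix _ _).isInfix
    · by_cases h2 : a.length + 1 ≤ s.length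
      · right
        have hd : (a ++ ' ' :: b).drop s.length = t ++ u := by
          rw [← hsu]; simp
        have hd2 : (a ++ ' ' :: b).drop s.length = b.drop (s.length - a.length - 1) := by
          have : a ++ ' ' :: b = (a ++ [' ']) ++ b := by simp
          rw [this, List.drop_append]
          rw [List.drop_eq_nil_of_le (by simp; omega)]
          simp only [List.nil_append, List.length_append, List.length_cons, List.length_nil]
          have h5 : s.length - (a.length + (0 + 1)) = s.length - a.length - 1 := by omega
          rw [h5]
        rw [hd2] at hd
        have ht : t = (b.drop (s.length - a.length - 1)).take t.length := by
          have := congrArg (List.take t.length) hd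
          simpa using this.symm
        rw [ht]
        exact (List.take_prefix _ _).isInfix.trans (List.drop_suffix _ _).isInfix
      · -- the separator position a.length falls inside t : contradiction
        exfalso
        have hget : (a ++ ' ' :: b)[a.length]? = some ' ' := by
          rw [List.getElem?_append_right (le_refl _)]; simp
        rw [← hsu] at hget
        have hlt : a.length - s.length < t.length := by omega
        have hge : s.length ≤ a.length := by omega
        have : (s ++ (t ++ u))[a.length]? = t[a.length - s.length]? := by
          rw [List.getElem?_append_right hge, List.getElem?_append_left (by omega)]
        rw [List.append_assoc] at hget
        rw [this] at hget
        exact hs (List.mem_of_getElem? hget)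
  · rintro (h | h)
    · exact h.trans ⟨[], ' ' :: b, by simp⟩
    · exact h.trans ⟨a ++ [' '], [], by simp⟩

-- a space-free pattern is in the space-join of a nonempty list iff it is in one of the parts
theorem infix_join_space (t : List Char) (hs : ' ' ∉ t) :
    ∀ (a : List Char) (ks : List (List Char)),
      (t <:+: PySem.Chars.join [' '] (a :: ks) ↔ t <:+: a ∨ ∃ k ∈ ks, t <:+: k) := by
  intro a ks
  induction ks generalizing a with
  | nil => simp [PySem.Chars.join_singleton]
  | cons k ks ih =>
    rw [PySem.Chars.join_cons_cons]
    have : a ++ [' '] ++ PySem.Chars.join [' '] (k :: ks) = a ++ ' ' :: PySem.Chars.join [' '] (k :: ks) := by simp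
    rw [this, infix_append_space_cons t _ _ hs, ih k]
    simp only [List.mem_cons]
    constructor
    · rintro (h | h | ⟨x, hx, h⟩)
      · exact Or.inl h
      · exact Or.inr ⟨k, Or.inl rfl, h⟩
      · exact Or.inr ⟨x, Or.inr hx, h⟩
    · rintro (h | ⟨x, (rfl | hx), h⟩)
      · exact Or.inl h
      · exact Or.inr (Or.inl h)
      · exact Or.inr (Or.inr ⟨x, hx, h⟩)

theorem lower_join_space (xs : List (List Char)) :
    PySem.Chars.lower (PySem.Chars.join [' '] xs) = PySem.Chars.join [' '] (xs.map PySem.Chars.lower) := by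
  induction xs with
  | nil => rfl
  | cons x xs ih =>
    cases xs with
    | nil => simp [PySem.Chars.join_singleton]
    | cons y ys =>
      rw [List.map_cons, List.map_cons, PySem.Chars.join_cons_cons,
          PySem.Chars.join_cons_cons, ← List.map_cons, ← ih]
      show List.map PySem.Chars.lowerChar _ = _
      rw [List.map_append, List.map_append]
      rfl

-- B's scan finds exactly the (nonempty) terms that occur as infixes of the haystack
theorem altScan_iff (hne : ∀ t ∈ lifeTermsAlt, t.toList ≠ []) :
    ∀ s : List Char, (altScan s = true ↔ ∃ t ∈ lifeTermsAlt, t.toList <:+: s) := by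
  intro s
  induction s with
  | nil =>
    simp only [altScan]
    exact ⟨fun h => absurd h (by decide), fun ⟨t, ht, h⟩ => absurd (List.infix_nil.mp h) (hne t ht)⟩
  | cons c rest ih =>
    simp only [altScan, Bool.or_eq_true, List.any_eq_true, ih]
    constructor
    · rintro (⟨t, ht, h⟩ | ⟨t, ht, h⟩)
      · exact ⟨t, ht, (PySem.Chars.startswith_iff _ _ |>.mp h).isInfix⟩
      · exact ⟨t, ht, h.trans (List.suffix_cons c rest).isInfix⟩
    · rintro ⟨t, ht, h⟩
      rcases List.infix_cons_iff.mp h with h | h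
      · exact Or.inl ⟨t, ht, (PySem.Chars.startswith_iff _ _).mpr h⟩
      · exact Or.inr ⟨t, ht, h⟩

-- the per-term core: a space-free term is an infix of the lowered blob iff it is in the
-- lowered topic or in some lowered keyword
theorem term_in_blob (t topic : String) (keywords : List String) (hs : ' ' ∉ t.toList) :
    (t.toList <:+: (PySem.Str.lower (PySem.Str.join " " (topic :: keywords))).toList) ↔
      (PySem.Str.isIn t (PySem.Str.lower topic) = true ∨
        ∃ k ∈ keywords, PySem.Str.isIn t (PySem.Str.lower k) = true) := by
  rw [PySem.Str.toList_lower, PySem.Str.toList_join]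
  have hsep : (" " : String).toList = [' '] := rfl
  rw [hsep, List.map_cons, lower_join_space, List.map_cons, List.map_map,
      infix_join_space t.toList hs]
  constructor
  · rintro (h | ⟨k, hk, h⟩)
    · exact Or.inl (by rw [PySem.Str.isIn_iff_infix, PySem.Str.toList_lower]; exact h)
    · obtain ⟨kw, hkw, rfl⟩ := List.mem_map.mp hk
      exact Or.inr ⟨kw, hkw, by rw [PySem.Str.isIn_iff_infix, PySem.Str.toList_lower]; exact h⟩
  · rintro (h | ⟨kw, hkw, h⟩)
    · exact Or.inl (by rw [PySem.Str.isIn_iff_infix, PySem.Str.toList_lower] at h; exact h)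
    · refine Or.inr ⟨PySem.Chars.lower kw.toList, List.mem_map.mpr ⟨kw, hkw, rfl⟩, ?_⟩
      rw [PySem.Str.isIn_iff_infix, PySem.Str.toList_lower] at h
      exact h

-- no term contains a space, none is empty, and the two term containers list the same strings
theorem terms_space_free : ∀ t ∈ (lifeScienceTermsA : List String), ' ' ∉ t.toList := by decide
set_option maxRecDepth 8000 in
theorem terms_nonempty : ∀ t ∈ lifeTermsAlt, t.toList ≠ [] := by decide
set_option maxRecDepth 8000 in
theorem termsA_eq_termsAlt : (lifeScienceTermsA : List String) = lifeTermsAlt := by decide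

-- ===== VERDICT (by name: the statement is the Claim_ definition above) =====
theorem is_life_sciences_topic_py_spec : Claim_equal_is_life_sciences_topic_py := by
  intro topic keywords _
  show is_life_sciences_topic_py topic keywords = is_life_sciences_topic_py_alt topic keywords
  unfold is_life_sciences_topic_py is_life_sciences_topic_py_alt
  simp only []
  rw [Bool.eq_iff_iff, altScan_iff terms_nonempty]
  simp only [Bool.or_eq_true, List.any_eq_true, List.mem_map, ← termsA_eq_termsAlt]
  constructor
  · rintro (⟨t, ht, h⟩ | ⟨k, ⟨kw, hkw, rfl⟩, t, ht, h⟩)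
    · exact ⟨t, ht, (term_in_blob t topic keywords (terms_space_free t ht)).mpr (Or.inl h)⟩
    · exact ⟨t, ht, (term_in_blob t topic keywords (terms_space_free t ht)).mpr
        (Or.inr ⟨kw, hkw, h⟩)⟩
  · rintro ⟨t, ht, h⟩
    rcases (term_in_blob t topic keywords (terms_space_free t ht)).mp h with h | ⟨kw, hkw, h⟩
    · exact Or.inl ⟨t, ht, h⟩
    · exact Or.inr ⟨PySem.Str.lower kw, ⟨kw, hkw, rfl⟩, t, ht, h⟩
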